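-- pv_equiv track=rewrite | github.com/Kelv48/CS3305-Team13 | src/gui/screens/preflop_range.py | get_valid_villain_positions
-- ===== SOURCE A (Python) =====
-- def get_valid_villain_positions(scenario, hero):
--     """
--     Returns a list of valid Villain seats for the given scenario and Hero seat.
--     """
--     if scenario == "Open":
--         return []
--     elif scenario in ["vs raise", "vs 4bet"]:
--         # For these scenarios, the valid positions are those used in the data.
--         valid_positions = ["HJ", "CO", "BTN", "SB", "BB"]
--         # Return all valid positions except the hero.
--         return [pos for pos in valid_positions if pos != hero]
--     elif scenario == "vs 3bet":
--         if hero == "LJ":   return ["HJ", "CO", "BTN", "SB", "BB"]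
--         if hero == "HJ":   return ["CO", "BTN", "SB", "BB"]
--         if hero == "CO":   return ["BTN", "SB", "BB"]
--         if hero == "BTN":  return ["SB", "BB"]
--         if hero == "SB":   return ["BB"]
--     elif scenario == "vs 5bet":
--         if hero == "LJ":   return ["HJ", "CO", "BTN", "SB", "BB"]
--         if hero == "HJ":   return ["CO", "BTN", "SB", "BB"]
--         if hero == "CO":   return ["BTN", "SB", "BB"]
--         if hero == "BTN":  return ["SB", "BB"]
--         if hero == "SB":   return ["BB"]
--     return []
-- ===== SOURCE B (Python) =====
-- def get_valid_villain_positions(scenario, hero):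
--     """
--     Returns a list of valid Villain seats for the given scenario and Hero seat.
--     """
--     order = ["LJ", "HJ", "CO", "BTN", "SB", "BB"]
--     if scenario == "Open":
--         return []
--     if scenario in ("vs raise", "vs 4bet"):
--         return [pos for pos in order[1:] if pos != hero]
--     if scenario in ("vs 3bet", "vs 5bet"):
--         if hero in order:
--             return order[order.index(hero) + 1:]
--         return []
--     return []
-- ===== Notes on version B (the rewrite author's own statement) =====
-- stated objective: simpler
-- what changed: Replaces the ten explicit hero branches of 'vs 3bet'/'vs 5bet' with one slice past the hero's position in the ordered seat list (order[index(hero)+1:]), guarded by a membership test so unknown heroes still yield [].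
import Mathlib
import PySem

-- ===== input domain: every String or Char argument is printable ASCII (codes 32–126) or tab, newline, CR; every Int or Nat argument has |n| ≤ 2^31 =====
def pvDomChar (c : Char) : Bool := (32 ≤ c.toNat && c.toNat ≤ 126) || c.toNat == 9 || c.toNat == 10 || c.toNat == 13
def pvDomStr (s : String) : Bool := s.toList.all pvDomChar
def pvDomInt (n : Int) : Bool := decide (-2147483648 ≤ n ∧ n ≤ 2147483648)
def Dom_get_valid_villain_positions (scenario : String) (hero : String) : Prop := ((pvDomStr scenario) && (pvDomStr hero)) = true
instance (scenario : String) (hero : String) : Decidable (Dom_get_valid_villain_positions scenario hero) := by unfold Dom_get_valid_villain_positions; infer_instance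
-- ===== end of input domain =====

-- B replaces the ten explicit hero branches of "vs 3bet"/"vs 5bet" with one slice past
-- the hero's position in the ordered seat list (simpler decomposition, same behaviour).


-- ===== PORT A =====
def get_valid_villain_positions (scenario : String) (hero : String) : List String :=
  if scenario = "Open" then []
  else if scenario = "vs raise" ∨ scenario = "vs 4bet" then
    (["HJ", "CO", "BTN", "SB", "BB"]).filter (fun pos => pos != hero)
  else if scenario = "vs 3bet" then
    if hero = "LJ" then ["HJ", "CO", "BTN", "SB", "BB"]
    else if hero = "HJ" then ["CO", "BTN", "SB", "BB"]
    else if hero = "CO" then ["BTN", "SB", "BB"]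
    else if hero = "BTN" then ["SB", "BB"]
    else if hero = "SB" then ["BB"]
    else []
  else if scenario = "vs 5bet" then
    if hero = "LJ" then ["HJ", "CO", "BTN", "SB", "BB"]
    else if hero = "HJ" then ["CO", "BTN", "SB", "BB"]
    else if hero = "CO" then ["BTN", "SB", "BB"]
    else if hero = "BTN" then ["SB", "BB"]
    else if hero = "SB" then ["BB"]
    else []
  else []

-- ===== PORT B =====
def pvOrder : List String := ["LJ", "HJ", "CO", "BTN", "SB", "BB"]

def get_valid_villain_positions_alt (scenario : String) (hero : String) : List String :=
  if scenario = "Open" then []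
  else if scenario = "vs raise" ∨ scenario = "vs 4bet" then
    (PySem.List.slice pvOrder (some 1) none).filter (fun pos => pos != hero)
  else if scenario = "vs 3bet" ∨ scenario = "vs 5bet" then
    match PySem.List.index? pvOrder hero with
    | some i => PySem.List.slice pvOrder (some ((i : Int) + 1)) none
    | none => []
  else []

-- ===== PRECONDITION & SPEC =====
def Spec_get_valid_villain_positions (scenario : String) (hero : String) (out : List String) : Prop := out = get_valid_villain_positions_alt scenario hero
instance (scenario : String) (hero : String) (out : List String) : Decidable (Spec_get_valid_villain_positions scenario hero out) := by unfold Spec_get_valid_villain_positions; infer_instance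

-- ===== CLAIM (what is proved, stated in full; the proofs are below) =====
def Claim_equal_get_valid_villain_positions : Prop := ∀ (scenario : String) (hero : String), Dom_get_valid_villain_positions scenario hero → Spec_get_valid_villain_positions scenario hero (get_valid_villain_positions scenario hero)

-- ===== LEMMAS AND PROOFS =====

-- B's slice branch agrees with A's explicit hero chain, for every hero string.
theorem pv_branch_eq (hero : String) :
    (if hero = "LJ" then (["HJ", "CO", "BTN", "SB", "BB"] : List String)
     else if hero = "HJ" then ["CO", "BTN", "SB", "BB"]
     else if hero = "CO" then ["BTN", "SB", "BB"]
     else if hero = "BTN" then ["SB", "BB"]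
     else if hero = "SB" then ["BB"]
     else []) =
    (match PySem.List.index? pvOrder hero with
     | some i => PySem.List.slice pvOrder (some ((i : Int) + 1)) none
     | none => []) := by
  by_cases h1 : hero = "LJ"; · subst h1; decide
  by_cases h2 : hero = "HJ"; · subst h2; decide
  by_cases h3 : hero = "CO"; · subst h3; decide
  by_cases h4 : hero = "BTN"; · subst h4; decide
  by_cases h5 : hero = "SB"; · subst h5; decide
  by_cases h6 : hero = "BB"
  · subst h6; decide
  · have hnone : PySem.List.index? pvOrder hero = none := by
      rw [PySem.List.index?_eq_none_iff]
      simp only [pvOrder, List.mem_cons, List.not_mem_nil, or_false]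
      tauto
    simp only [if_neg h1, if_neg h2, if_neg h3, if_neg h4, if_neg h5]
    rw [hnone]

-- ===== VERDICT (by name: the statement is the Claim_ definition above) =====
theorem get_valid_villain_positions_spec : Claim_equal_get_valid_villain_positions := by
  intro scenario hero _
  unfold Spec_get_valid_villain_positions get_valid_villain_positions get_valid_villain_positions_alt
  by_cases hO : scenario = "Open"
  · simp [hO]
  by_cases hR : scenario = "vs raise" ∨ scenario = "vs 4bet"
  · simp [hO, hR, pvOrder, PySem.List.slice_from_one]
  by_cases h3 : scenario = "vs 3bet"
  · subst h3
    rw [if_neg (by decide : ¬(("vs 3bet" : String) = "Open")),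
        if_neg (by decide : ¬(("vs 3bet" : String) = "vs raise" ∨ ("vs 3bet" : String) = "vs 4bet")),
        if_neg (by decide : ¬(("vs 3bet" : String) = "Open")),
        if_neg (by decide : ¬(("vs 3bet" : String) = "vs raise" ∨ ("vs 3bet" : String) = "vs 4bet")),
        if_pos (rfl : ("vs 3bet" : String) = "vs 3bet"),
        if_pos (by decide : ("vs 3bet" : String) = "vs 3bet" ∨ ("vs 3bet" : String) = "vs 5bet")]
    exact pv_branch_eq hero
  by_cases h5 : scenario = "vs 5bet"
  · subst h5
    rw [if_neg (by decide : ¬(("vs 5bet" : String) = "Open")),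
        if_neg (by decide : ¬(("vs 5bet" : String) = "vs raise" ∨ ("vs 5bet" : String) = "vs 4bet")),
        if_neg (by decide : ¬(("vs 5bet" : String) = "Open")),
        if_neg (by decide : ¬(("vs 5bet" : String) = "vs raise" ∨ ("vs 5bet" : String) = "vs 4bet")),
        if_neg (by decide : ¬(("vs 5bet" : String) = "vs 3bet")),
        if_pos (rfl : ("vs 5bet" : String) = "vs 5bet"),
        if_pos (by decide : ("vs 5bet" : String) = "vs 3bet" ∨ ("vs 5bet" : String) = "vs 5bet")]
    exact pv_branch_eq hero
  · simp [hO, hR, h3, h5]
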